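-- pv_equiv track=rewrite | github.com/mateopasho-jpg/ad-post | meta_ads_tool.py | _guess_media_type_from_url
-- ===== SOURCE A (Python) =====
-- from typing import Any, Dict, List, Optional, Tuple, Literal
--
-- def _guess_media_type_from_url(url: str) -> Optional[str]:
--     u = (url or "").lower()
--     for ext in (".mp4", ".mov", ".m4v", ".webm"):
--         if u.split("?")[0].endswith(ext):
--             return "video"
--     for ext in (".jpg", ".jpeg", ".png", ".webp", ".gif"):
--         if u.split("?")[0].endswith(ext):
--             return "image"
--     return None
-- ===== SOURCE B (Python) =====
-- _EXT = {
--     ".mp4": "video", ".mov": "video", ".m4v": "video", ".webm": "video",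
--     ".jpg": "image", ".jpeg": "image", ".png": "image", ".webp": "image", ".gif": "image",
-- }
--
-- def _guess_media_type_from_url(url):
--     base = (url or "").lower().split("?")[0]
--     i = base.rfind(".")
--     ext = base[i:] if i != -1 else ""
--     return _EXT.get(ext)
-- ===== Notes on version B (the rewrite author's own statement) =====
-- stated objective: simpler
-- what changed: A's two for-loops of endswith tests (nine suffix scans) are replaced by computing the extension once (rfind of the last dot, then a slice) and a single dict lookup in a precomputed extension-to-kind table.
import Mathlib
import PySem

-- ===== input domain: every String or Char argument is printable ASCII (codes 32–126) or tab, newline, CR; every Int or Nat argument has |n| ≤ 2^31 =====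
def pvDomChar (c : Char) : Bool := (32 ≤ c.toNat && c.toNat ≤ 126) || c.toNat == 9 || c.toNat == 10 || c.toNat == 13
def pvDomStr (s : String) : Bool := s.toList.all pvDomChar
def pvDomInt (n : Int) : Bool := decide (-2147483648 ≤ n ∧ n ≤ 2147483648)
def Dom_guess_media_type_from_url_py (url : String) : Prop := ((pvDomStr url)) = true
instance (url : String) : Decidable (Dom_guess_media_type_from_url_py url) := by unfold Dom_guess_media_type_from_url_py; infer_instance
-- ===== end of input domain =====

-- B replaces A's two endswith scan-loops by a single table lookup keyed on the extension
-- computed with rfind of the last dot; objective: simpler/idiomatic, same exact return value.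
-- ('url or ""' is the identity on str arguments — the only falsy str is "" itself — so both
-- ports apply lower directly to url. Extension string literals are written as Char lists.)

-- ===== PORT A =====
-- u.split("?")[0]: Python split never returns an empty list, so [0] cannot raise; headD [] is exact.
def guess_media_type_from_url_py (url : String) : Option String :=
  let u := PySem.Chars.lower url.toList
  if PySem.Chars.endswith ((PySem.Chars.splitOn u ['?']).headD []) ['.','m','p','4'] then some "video"
  else if PySem.Chars.endswith ((PySem.Chars.splitOn u ['?']).headD []) ['.','m','o','v'] then some "video"
  else if PySem.Chars.endswith ((PySem.Chars.splitOn u ['?']).headD []) ['.','m','4','v'] then some "video"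
  else if PySem.Chars.endswith ((PySem.Chars.splitOn u ['?']).headD []) ['.','w','e','b','m'] then some "video"
  else if PySem.Chars.endswith ((PySem.Chars.splitOn u ['?']).headD []) ['.','j','p','g'] then some "image"
  else if PySem.Chars.endswith ((PySem.Chars.splitOn u ['?']).headD []) ['.','j','p','e','g'] then some "image"
  else if PySem.Chars.endswith ((PySem.Chars.splitOn u ['?']).headD []) ['.','p','n','g'] then some "image"
  else if PySem.Chars.endswith ((PySem.Chars.splitOn u ['?']).headD []) ['.','w','e','b','p'] then some "image"
  else if PySem.Chars.endswith ((PySem.Chars.splitOn u ['?']).headD []) ['.','g','i','f'] then some "image"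
  else none

-- ===== PORT B =====
-- the module-level dict _EXT of Source B
def pvExtTable : PySem.Dict (List Char) String :=
  ⟨[(['.','m','p','4'], "video"), (['.','m','o','v'], "video"), (['.','m','4','v'], "video"),
    (['.','w','e','b','m'], "video"), (['.','j','p','g'], "image"), (['.','j','p','e','g'], "image"),
    (['.','p','n','g'], "image"), (['.','w','e','b','p'], "image"), (['.','g','i','f'], "image")]⟩

def guess_media_type_from_url_py_alt (url : String) : Option String :=
  let base := (PySem.Chars.splitOn (PySem.Chars.lower url.toList) ['?']).headD []
  let i := PySem.Chars.rfind base ['.']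
  let ext := if i ≠ -1 then PySem.List.slice base (some i) none else []
  PySem.Dict.get? pvExtTable ext

-- ===== PRECONDITION & SPEC =====
def Spec_guess_media_type_from_url_py (url : String) (out : Option String) : Prop := out = guess_media_type_from_url_py_alt url
instance (url : String) (out : Option String) : Decidable (Spec_guess_media_type_from_url_py url out) := by unfold Spec_guess_media_type_from_url_py; infer_instance

-- ===== CLAIM (what is proved, stated in full; the proofs are below) =====
def Claim_equal_guess_media_type_from_url_py : Prop := ∀ (url : String), Dom_guess_media_type_from_url_py url → Spec_guess_media_type_from_url_py url (guess_media_type_from_url_py url)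

-- ===== LEMMAS AND PROOFS =====

-- rfind.go unfolding equations
theorem rfind_go_zero (s sub : List Char) :
    PySem.Chars.rfind.go s sub 0 = (if sub.isPrefixOf s then 0 else -1) := rfl

theorem rfind_go_succ (s sub : List Char) (j : Nat) :
    PySem.Chars.rfind.go s sub (j+1) =
      (if sub.isPrefixOf (s.drop (j+1)) then ((j : Int)+1) else PySem.Chars.rfind.go s sub j) := rfl

-- ['.'] is a prefix of l iff l starts with '.'
theorem dot_prefix_iff (l : List Char) :
    List.isPrefixOf ['.'] l = true ↔ ∃ t, l = '.' :: t := by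
  cases l with
  | nil => simp [List.isPrefixOf]
  | cons c t =>
    simp only [List.isPrefixOf, Bool.and_true, beq_iff_eq, List.cons.injEq]
    constructor
    · intro h; exact ⟨t, h.symm, rfl⟩
    · rintro ⟨t', hc, _⟩; exact hc.symm

-- no dot in s ⇒ rfind.go returns -1
theorem rfind_go_no_dot (s : List Char) (h : '.' ∉ s) : ∀ i, PySem.Chars.rfind.go s ['.'] i = -1 := by
  intro i
  induction i with
  | zero =>
    rw [rfind_go_zero]
    split
    · next hp =>
      obtain ⟨t, ht⟩ := (dot_prefix_iff s).1 hp
      exact absurd (ht ▸ List.mem_cons_self ..) h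
    · rfl
  | succ j ih =>
    rw [rfind_go_succ]
    split
    · next hp =>
      obtain ⟨t, ht⟩ := (dot_prefix_iff _).1 hp
      exact absurd (List.mem_of_mem_drop (ht ▸ List.mem_cons_self ..)) h
    · exact ih

-- with a last-dot decomposition, rfind.go finds p.length
theorem rfind_go_last_dot (p t : List Char) (ht : '.' ∉ t) :
    ∀ i, p.length ≤ i → PySem.Chars.rfind.go (p ++ '.' :: t) ['.'] i = (p.length : Int) := by
  intro i
  induction i with
  | zero =>
    intro hi
    have hp : p = [] := List.eq_nil_of_length_eq_zero (Nat.le_zero.mp hi)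
    subst hp
    rw [rfind_go_zero]
    simp [List.isPrefixOf]
  | succ j ih =>
    intro hi
    rw [rfind_go_succ]
    rcases Nat.lt_or_ge j p.length with hj | hj
    · have hje : j + 1 = p.length := by omega
      have hdrop : (p ++ '.' :: t).drop (j+1) = '.' :: t := by
        rw [hje, List.drop_append_of_le_length (Nat.le_refl _), List.drop_length]
        simp
      rw [hdrop]
      have : List.isPrefixOf ['.'] ('.' :: t) = true := by simp [List.isPrefixOf]
      rw [if_pos this]
      omega
    · have hdrop : (p ++ '.' :: t).drop (j+1) = t.drop (j - p.length) := by
        have h1 : j + 1 = p.length + (j - p.length + 1) := by omega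
        rw [h1, List.drop_length_add_append, List.drop_succ_cons]
      rw [hdrop]
      split
      · next hp =>
        obtain ⟨t', ht'⟩ := (dot_prefix_iff _).1 hp
        exact absurd (List.mem_of_mem_drop (ht' ▸ List.mem_cons_self ..)) ht
      · exact ih hj

-- the slice base[rfind:] at the last dot
theorem slice_last_dot (p t : List Char) :
    PySem.List.slice (p ++ '.' :: t) (some (p.length : Int)) none = '.' :: t := by
  simp only [PySem.List.slice, PySem.List.clampIdx]
  have h1 : ¬ ((p.length : Int) < 0) := by omega
  simp only [if_neg h1, Int.toNat_natCast, List.length_append, List.length_cons]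
  have h2 : min p.length (p.length + (t.length + 1)) = p.length := by omega
  rw [h2]
  have h3 : p.length + (t.length + 1) - p.length = t.length + 1 := by omega
  rw [h3, List.drop_append_of_le_length (Nat.le_refl _), List.drop_length]
  simp

-- no dot in b ⇒ endswith b ('.'::m) is false
theorem endswith_no_dot (b m : List Char) (h : '.' ∉ b) :
    PySem.Chars.endswith b ('.' :: m) = false := by
  by_contra hc
  have hE : PySem.Chars.endswith b ('.' :: m) = true := by
    cases hx : PySem.Chars.endswith b ('.' :: m) <;> simp_all
  have hsuf : ('.' :: m) <:+ b := (PySem.Chars.endswith_iff _ _).1 hE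
  exact h (hsuf.subset (List.mem_cons_self ..))

-- with a last-dot decomposition, endswith b ('.'::m) tests m = t exactly
theorem endswith_last_dot (p t m : List Char) (ht : '.' ∉ t) (hm : '.' ∉ m) :
    PySem.Chars.endswith (p ++ '.' :: t) ('.' :: m) = decide (m = t) := by
  rcases Decidable.em (m = t) with he | he
  · subst he
    simp only [decide_true]
    exact (PySem.Chars.endswith_iff _ _).2 ⟨p, rfl⟩
  · simp only [he, decide_false]
    by_contra hc
    have hE : PySem.Chars.endswith (p ++ '.' :: t) ('.' :: m) = true := by
      cases hx : PySem.Chars.endswith (p ++ '.' :: t) ('.' :: m) <;> simp_all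
    have h1 : ('.' :: m) <:+ (p ++ '.' :: t) := (PySem.Chars.endswith_iff _ _).1 hE
    have h2 : ('.' :: t) <:+ (p ++ '.' :: t) := ⟨p, rfl⟩
    rcases List.suffix_or_suffix_of_suffix h1 h2 with hs | hs
    · rcases hs with ⟨q, hq⟩
      cases q with
      | nil =>
        simp only [List.nil_append, List.cons.injEq] at hq
        exact he hq.2
      | cons c q' =>
        rw [List.cons_append] at hq
        have hqt : ('.' :: m) <:+ t := by
          cases hq
          exact ⟨q', rfl⟩
        exact ht (hqt.subset (List.mem_cons_self ..))
    · rcases hs with ⟨q, hq⟩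
      cases q with
      | nil =>
        simp only [List.nil_append, List.cons.injEq] at hq
        exact he hq.2.symm
      | cons c q' =>
        rw [List.cons_append] at hq
        have hqm : ('.' :: t) <:+ m := by
          cases hq
          exact ⟨q', rfl⟩
        exact hm (hqm.subset (List.mem_cons_self ..))

-- '.' ∈ b ⇒ b splits at its LAST dot
theorem exists_last_dot (b : List Char) (h : '.' ∈ b) :
    ∃ p t, b = p ++ '.' :: t ∧ '.' ∉ t := by
  induction b with
  | nil => cases h
  | cons c bs ih =>
    by_cases hbs : '.' ∈ bs
    · obtain ⟨p, t, hb, ht⟩ := ih hbs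
      exact ⟨c :: p, t, by rw [hb, List.cons_append], ht⟩
    · have hc : c = '.' := by
        rcases List.mem_cons.mp h with h' | h'
        · exact h'.symm
        · exact absurd h' hbs
      exact ⟨[], bs, by rw [hc, List.nil_append], hbs⟩

-- the core: A's if-chain on any base equals B's table lookup on the computed extension
theorem chain_eq_lookup (b : List Char) :
    (if PySem.Chars.endswith b ['.','m','p','4'] then some "video"
     else if PySem.Chars.endswith b ['.','m','o','v'] then some "video"
     else if PySem.Chars.endswith b ['.','m','4','v'] then some "video"
     else if PySem.Chars.endswith b ['.','w','e','b','m'] then some "video"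
     else if PySem.Chars.endswith b ['.','j','p','g'] then some "image"
     else if PySem.Chars.endswith b ['.','j','p','e','g'] then some "image"
     else if PySem.Chars.endswith b ['.','p','n','g'] then some "image"
     else if PySem.Chars.endswith b ['.','w','e','b','p'] then some "image"
     else if PySem.Chars.endswith b ['.','g','i','f'] then some "image"
     else (none : Option String))
    = PySem.Dict.get? pvExtTable
        (if PySem.Chars.rfind b ['.'] ≠ -1 then PySem.List.slice b (some (PySem.Chars.rfind b ['.'])) none else []) := by
  by_cases hdot : '.' ∈ b
  · obtain ⟨p, t, hb, ht⟩ := exists_last_dot b hdot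
    subst hb
    have hrf : PySem.Chars.rfind (p ++ '.' :: t) ['.'] = (p.length : Int) := by
      unfold PySem.Chars.rfind
      exact rfind_go_last_dot p t ht _ (by simp)
    rw [hrf]
    have hne : (p.length : Int) ≠ -1 := by omega
    rw [if_pos hne, slice_last_dot]
    rw [endswith_last_dot p t _ ht (by decide), endswith_last_dot p t _ ht (by decide),
        endswith_last_dot p t _ ht (by decide), endswith_last_dot p t _ ht (by decide),
        endswith_last_dot p t _ ht (by decide), endswith_last_dot p t _ ht (by decide),
        endswith_last_dot p t _ ht (by decide), endswith_last_dot p t _ ht (by decide),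
        endswith_last_dot p t _ ht (by decide)]
    simp only [PySem.Dict.get?, pvExtTable, List.find?, List.cons_beq_cons]
    by_cases h1 : ['m','p','4'] = t
    · subst h1; decide
    by_cases h2 : ['m','o','v'] = t
    · subst h2; decide
    by_cases h3 : ['m','4','v'] = t
    · subst h3; decide
    by_cases h4 : ['w','e','b','m'] = t
    · subst h4; decide
    by_cases h5 : ['j','p','g'] = t
    · subst h5; decide
    by_cases h6 : ['j','p','e','g'] = t
    · subst h6; decide
    by_cases h7 : ['p','n','g'] = t
    · subst h7; decide
    by_cases h8 : ['w','e','b','p'] = t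
    · subst h8; decide
    by_cases h9 : ['g','i','f'] = t
    · subst h9; decide
    have e : ∀ (x : List Char), ¬ x = t → (x == t) = false :=
      fun x hx => (beq_eq_false_iff_ne (a := x) (b := t)).mpr hx
    rw [e _ h1, e _ h2, e _ h3, e _ h4, e _ h5, e _ h6, e _ h7, e _ h8, e _ h9]
    simp [h1, h2, h3, h4, h5, h6, h7, h8, h9]
  · have hrf : PySem.Chars.rfind b ['.'] = -1 := by
      unfold PySem.Chars.rfind
      exact rfind_go_no_dot b hdot _
    rw [hrf]
    simp only [ne_eq, not_true_eq_false, if_false]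
    rw [endswith_no_dot _ _ hdot, endswith_no_dot _ _ hdot, endswith_no_dot _ _ hdot,
        endswith_no_dot _ _ hdot, endswith_no_dot _ _ hdot, endswith_no_dot _ _ hdot,
        endswith_no_dot _ _ hdot, endswith_no_dot _ _ hdot, endswith_no_dot _ _ hdot]
    rfl

-- ===== VERDICT (by name: the statement is the Claim_ definition above) =====
theorem guess_media_type_from_url_py_spec : Claim_equal_guess_media_type_from_url_py := by
  intro url _
  unfold Spec_guess_media_type_from_url_py guess_media_type_from_url_py guess_media_type_from_url_py_alt
  exact chain_eq_lookup _
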